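-- pv_equiv track=rewrite | github.com/DwFinch07/PDF-Attendance-Parser | UI.py | best_absent_days
-- ===== SOURCE A (Python) =====
-- def best_absent_days(attended, school_days, n=5):
--     """
--     Return up to n absent days, prioritising consecutive runs.
--     school_days already has holidays removed, so holidays never
--     appear in absent or attended — they are invisible to this logic.
--     """
--     absent = sorted(school_days - attended)  # Days in school but not attended
--     if not absent or n <= 0:
--         return []
--     if len(absent) <= n:
--         return absent  # Fewer absences than limit — return them all
--
--     # Build a rank for each school day by its position in the sorted list
--     # This lets us check if two absent days are consecutive school days
--     # (even if there's a holiday between them in calendar terms)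
--     school_order = sorted(school_days)
--     rank = {d: i for i, d in enumerate(school_order)}  # Dict comprehension: {day: index}
--
--     # Group absent days into consecutive runs based on school-day order
--     runs, cur = [], [absent[0]]
--     for d in absent[1:]:
--         if rank[d] == rank[cur[-1]] + 1:  # Next school day in sequence
--             cur.append(d)
--         else:
--             runs.append(cur); cur = [d]  # Start a new run
--     runs.append(cur)
--
--     # Sort runs: longest first, then by earliest start date
--     runs.sort(key=lambda r: (-len(r), r[0]))
--
--     # Pick days from the longest runs first, up to the limit n
--     chosen, used = [], set()
--     for run in runs:
--         for d in run:
--             if len(chosen) >= n: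
--                 break
--             if d not in used:
--                 chosen.append(d); used.add(d)
--         if len(chosen) >= n:
--             break
--     # Fill any remaining slots with leftover absent days
--     for d in absent:
--         if len(chosen) >= n:
--             break
--         if d not in used:
--             chosen.append(d); used.add(d)
--     return sorted(chosen)
-- ===== SOURCE B (Python) =====
-- def best_absent_days(attended, school_days, n=5):
--     """
--     Same result as A, by a different decomposition: annotate each absent day
--     with the length of its consecutive run, then pick the first n days of a
--     single stable sort by (run length descending, day ascending).
--     """
--     absent = sorted(school_days - attended)
--     if not absent or n <= 0:
--         return []
--     if len(absent) <= n:
--         return absent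
--
--     rank = {d: i for i, d in enumerate(sorted(school_days))}
--
--     # (day, run_length) for every absent day, grouping consecutive school days
--     ann = []
--     i = 0
--     while i < len(absent):
--         j = i
--         while j + 1 < len(absent) and rank[absent[j + 1]] == rank[absent[j]] + 1:
--             j += 1
--         for k in range(i, j + 1):
--             ann.append((absent[k], j - i + 1))
--         i = j + 1
--
--     ann.sort(key=lambda t: (-t[1], t[0]))
--     return sorted(t[0] for t in ann[:n])
-- ===== Notes on version B (the rewrite author's own statement) =====
-- stated objective: simpler
-- what changed: Replaces A's runs-as-lists sort plus nested greedy selection loops with a used-set and a dead leftover-fill pass by annotating each absent day with its run length and taking the first n days of one stable sort keyed by (-run_length, day).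
import Mathlib
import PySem

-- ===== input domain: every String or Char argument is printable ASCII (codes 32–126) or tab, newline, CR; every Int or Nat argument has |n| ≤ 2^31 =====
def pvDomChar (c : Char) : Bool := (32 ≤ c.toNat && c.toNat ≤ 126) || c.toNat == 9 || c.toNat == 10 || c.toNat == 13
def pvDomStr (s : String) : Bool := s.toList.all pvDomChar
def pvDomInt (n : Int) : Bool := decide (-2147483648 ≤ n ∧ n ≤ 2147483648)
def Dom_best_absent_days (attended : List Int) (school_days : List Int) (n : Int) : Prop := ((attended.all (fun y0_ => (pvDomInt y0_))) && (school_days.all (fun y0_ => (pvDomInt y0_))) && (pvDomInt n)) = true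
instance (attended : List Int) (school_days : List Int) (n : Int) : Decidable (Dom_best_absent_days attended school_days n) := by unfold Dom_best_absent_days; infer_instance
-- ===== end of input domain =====

-- B replaces A's sorted-runs + nested greedy selection (and its dead leftover-fill loop)
-- by one stable sort of the absent days keyed by (run length descending, day ascending);
-- equivalence of the two selections is proved for all inputs (no Pre_).
-- The two sets passed from Python arrive as their lists of distinct elements.

-- ===== PORT A =====
def best_absent_days (attended : List Int) (school_days : List Int) (n : Int) : List Int :=
  let absent := PySem.List.sorted (PySem.Set.diff (PySem.Set.ofList school_days) attended) (fun x => x) false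
  if absent = [] ∨ n ≤ 0 then []
  else if (absent.length : Int) ≤ n then absent
  else
    let school_order := PySem.List.sorted (PySem.Set.ofList school_days) (fun x => x) false
    let rank : PySem.Dict Int Int :=
      (PySem.List.enumerate school_order 0).foldl (fun d p => d.insert p.2 p.1) PySem.Dict.empty
    -- runs, cur = [], [absent[0]]; for d in absent[1:]: …
    -- rank[d] / cur[-1] via getD: exact — cur stays nonempty and every absent day is a key of rank
    let st := (absent.drop 1).foldl
      (fun (s : List (List Int) × List Int) d =>
        if rank.getD d 0 = rank.getD ((s.2.getLast?).getD 0) 0 + 1 then (s.1, s.2 ++ [d])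
        else (s.1 ++ [s.2], [d]))
      ([], [absent.headD 0])    -- absent[0]: exact, absent ≠ [] in this branch
    let runs := st.1 ++ [st.2]
    -- runs.sort(key=lambda r: (-len(r), r[0]));  r[0] via headD: exact, every run is nonempty
    let runsS := PySem.List.sorted2 runs (fun r => -(r.length : Int)) (fun r => r.headD 0) false
    -- chosen, used = [], set(); nested loops with break (state is frozen once len(chosen) >= n)
    let cu := runsS.foldl
      (fun st2 run => run.foldl
        (fun (st3 : List Int × PySem.Set Int) d =>
          if n ≤ (st3.1.length : Int) then st3
          else if PySem.Set.contains st3.2 d then st3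
          else (st3.1 ++ [d], PySem.Set.add st3.2 d))
        st2)
      ([], PySem.Set.empty)
    -- leftover fill loop over absent, same body
    let cu2 := absent.foldl
      (fun (st3 : List Int × PySem.Set Int) d =>
        if n ≤ (st3.1.length : Int) then st3
        else if PySem.Set.contains st3.2 d then st3
        else (st3.1 ++ [d], PySem.Set.add st3.2 d))
      cu
    PySem.List.sorted cu2.1 (fun x => x) false

-- ===== PORT B =====
-- inner while loop of Source B: consume the tail of the current consecutive run
def takeRun (rnk : Int → Int) (prev : Int) : List Int → List Int × List Int
  | [] => ([], [])
  | d :: rest =>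
      if rnk d = prev + 1 then
        let p := takeRun rnk (rnk d) rest
        (d :: p.1, p.2)
      else ([], d :: rest)

theorem takeRun_append (rnk : Int → Int) (prev : Int) (l : List Int) :
    (takeRun rnk prev l).1 ++ (takeRun rnk prev l).2 = l := by
  induction l generalizing prev with
  | nil => simp [takeRun]
  | cons d rest ih =>
      by_cases h : rnk d = prev + 1 <;> simp [takeRun, h, ih]

theorem takeRun_snd_length_le (rnk : Int → Int) (prev : Int) (l : List Int) :
    (takeRun rnk prev l).2.length ≤ l.length := by
  conv_rhs => rw [← takeRun_append rnk prev l]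
  simp

-- outer while loop of Source B: build the (day, run_length) annotation list
def annotate (rnk : Int → Int) : List Int → List (Int × Int)
  | [] => []
  | d :: rest =>
      let p := takeRun rnk (rnk d) rest
      (d :: p.1).map (fun x => (x, ((d :: p.1).length : Int))) ++ annotate rnk p.2
termination_by l => l.length
decreasing_by
  exact Nat.lt_succ_of_le (takeRun_snd_length_le _ _ _)

def best_absent_days_alt (attended : List Int) (school_days : List Int) (n : Int) : List Int :=
  let absent := PySem.List.sorted (PySem.Set.diff (PySem.Set.ofList school_days) attended) (fun x => x) false
  if absent = [] ∨ n ≤ 0 then []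
  else if (absent.length : Int) ≤ n then absent
  else
    let school_order := PySem.List.sorted (PySem.Set.ofList school_days) (fun x => x) false
    let rank : PySem.Dict Int Int :=
      (PySem.List.enumerate school_order 0).foldl (fun d p => d.insert p.2 p.1) PySem.Dict.empty
    let ann := annotate (fun d => rank.getD d 0) absent   -- rank[d] via getD: exact, keys cover absent
    -- ann.sort(key=lambda t: (-t[1], t[0]));  ann[:n] via take: exact, 0 < n in this branch
    let best := (PySem.List.sorted2 ann (fun t => -t.2) (fun t => t.1) false).take n.toNat
    PySem.List.sorted (best.map (fun t => t.1)) (fun x => x) false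

-- ===== PRECONDITION & SPEC =====
def Spec_best_absent_days (attended : List Int) (school_days : List Int) (n : Int) (out : List Int) : Prop := out = best_absent_days_alt attended school_days n
instance (attended : List Int) (school_days : List Int) (n : Int) (out : List Int) : Decidable (Spec_best_absent_days attended school_days n out) := by unfold Spec_best_absent_days; infer_instance

-- ===== CLAIM (what is proved, stated in full; the proofs are below) =====
def Claim_equal_best_absent_days : Prop := ∀ (attended : List Int) (school_days : List Int) (n : Int), Dom_best_absent_days attended school_days n → Spec_best_absent_days attended school_days n (best_absent_days attended school_days n)


-- ===== LEMMAS AND PROOFS =====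

-- proof-only: the runs of consecutive (by rnk) days, as Source B's grouping produces them
def runsB (rnk : Int → Int) : List Int → List (List Int)
  | [] => []
  | d :: rest =>
      let p := takeRun rnk (rnk d) rest
      (d :: p.1) :: runsB rnk p.2
termination_by l => l.length
decreasing_by
  exact Nat.lt_succ_of_le (takeRun_snd_length_le _ _ _)

-- proof-only: A's runs-building loop as a recursion carrying the current run
def runsCont (rnk : Int → Int) : List Int → List Int → List (List Int)
  | cur, [] => [cur]
  | cur, d :: rest =>
      if rnk d = rnk ((cur.getLast?).getD 0) + 1 then runsCont rnk (cur ++ [d]) rest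
      else cur :: runsCont rnk [d] rest

-- proof-only: the selection loop collapsed to its chosen-list component
def gsel (n : Int) (c : List Int) (d : Int) : List Int :=
  if n ≤ (c.length : Int) then c else if d ∈ c then c else c ++ [d]

theorem flatten_runsB (rnk : Int → Int) (l : List Int) : (runsB rnk l).flatten = l := by
  induction l using runsB.induct rnk with
  | case1 => simp [runsB]
  | case2 d rest p ih =>
      have ih' : (runsB rnk (takeRun rnk (rnk d) rest).2).flatten = (takeRun rnk (rnk d) rest).2 := ih
      rw [runsB]
      simp only [List.flatten_cons, List.cons_append, ih']
      rw [takeRun_append]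

theorem runsB_ne_nil (rnk : Int → Int) (l : List Int) : ∀ r ∈ runsB rnk l, r ≠ [] := by
  induction l using runsB.induct rnk with
  | case1 => simp [runsB]
  | case2 d rest p ih =>
      rw [runsB]
      intro r hr
      rcases List.mem_cons.1 hr with h | h
      · subst h; simp
      · exact ih r h

theorem annotate_eq_flatMap (rnk : Int → Int) (l : List Int) :
    annotate rnk l = (runsB rnk l).flatMap (fun r => r.map (fun x => (x, (r.length : Int)))) := by
  induction l using runsB.induct rnk with
  | case1 => simp [annotate, runsB]
  | case2 d rest p ih =>
      have ih' : annotate rnk (takeRun rnk (rnk d) rest).2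
          = List.flatMap (fun r => List.map (fun x => (x, (r.length : Int))) r) (runsB rnk (takeRun rnk (rnk d) rest).2) := ih
      rw [annotate, runsB]
      simp only [List.flatMap_cons, ih']

theorem foldl_runs (rnk : Int → Int) (l : List Int) (acc : List (List Int)) (cur : List Int) :
    (l.foldl (fun (s : List (List Int) × List Int) d =>
        if rnk d = rnk ((s.2.getLast?).getD 0) + 1 then (s.1, s.2 ++ [d])
        else (s.1 ++ [s.2], [d])) (acc, cur)).1
      ++ [(l.foldl (fun (s : List (List Int) × List Int) d =>
        if rnk d = rnk ((s.2.getLast?).getD 0) + 1 then (s.1, s.2 ++ [d])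
        else (s.1 ++ [s.2], [d])) (acc, cur)).2]
    = acc ++ runsCont rnk cur l := by
  induction l generalizing acc cur with
  | nil => simp [runsCont]
  | cons d rest ih =>
      simp only [List.foldl_cons]
      by_cases h : rnk d = rnk ((cur.getLast?).getD 0) + 1
      · rw [if_pos h, runsCont, if_pos h]
        exact ih acc (cur ++ [d])
      · rw [if_neg h, runsCont, if_neg h]
        rw [ih (acc ++ [cur]) [d]]
        simp

theorem runsCont_eq (rnk : Int → Int) (l : List Int) :
    ∀ cur : List Int, cur ≠ [] →
    runsCont rnk cur l =
      (cur ++ (takeRun rnk (rnk ((cur.getLast?).getD 0)) l).1) ::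
        runsB rnk (takeRun rnk (rnk ((cur.getLast?).getD 0)) l).2 := by
  induction l with
  | nil => intro cur _; simp [runsCont, takeRun, runsB]
  | cons d rest ih =>
      intro cur hcur
      by_cases hd : rnk d = rnk ((cur.getLast?).getD 0) + 1
      · rw [runsCont, if_pos hd, ih (cur ++ [d]) (by simp), takeRun, if_pos hd]
        simp
      · rw [runsCont, if_neg hd, ih [d] (by simp), takeRun, if_neg hd]
        rw [runsB]
        simp [List.getLast?_singleton]

theorem sel_pair (n : Int) (l : List Int) :
    ∀ c : List Int,
    l.foldl (fun (st3 : List Int × PySem.Set Int) d =>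
        if n ≤ (st3.1.length : Int) then st3
        else if PySem.Set.contains st3.2 d then st3
        else (st3.1 ++ [d], PySem.Set.add st3.2 d)) (c, c)
      = (l.foldl (gsel n) c, l.foldl (gsel n) c) := by
  induction l with
  | nil => intro c; rfl
  | cons d rest ih =>
      intro c
      have hstep : (if n ≤ (c.length : Int) then ((c, c) : List Int × PySem.Set Int)
          else if PySem.Set.contains c d then (c, c)
          else (c ++ [d], PySem.Set.add c d)) = (gsel n c d, gsel n c d) := by
        unfold gsel
        by_cases h1 : n ≤ (c.length : Int)
        · simp [h1]
        · by_cases h2 : d ∈ c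
          · simp [h1, h2, PySem.Set.contains]
          · simp [h1, h2, PySem.Set.contains, PySem.Set.add]
      simp only [List.foldl_cons]
      rw [hstep]
      exact ih (gsel n c d)

theorem gsel_full (n : Int) (l : List Int) : ∀ c : List Int, n ≤ (c.length : Int) →
    l.foldl (gsel n) c = c := by
  induction l with
  | nil => intro c _; rfl
  | cons d rest ih =>
      intro c h
      simp only [List.foldl_cons, gsel, if_pos h]
      exact ih c h

theorem gsel_fresh (n : Int) (l : List Int) : ∀ c : List Int, l.Nodup → (∀ x ∈ l, x ∉ c) →
    l.foldl (gsel n) c = c ++ l.take (n.toNat - c.length) := by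
  induction l with
  | nil => intro c _ _; simp
  | cons d rest ih =>
      intro c hnd hfr
      by_cases h1 : n ≤ (c.length : Int)
      · have h0 : n.toNat - c.length = 0 := by omega
        simp only [List.foldl_cons, gsel, if_pos h1, h0, List.take_zero, List.append_nil]
        exact gsel_full n rest c h1
      · have hdc : d ∉ c := hfr d (by simp)
        simp only [List.foldl_cons, gsel, if_neg h1, if_neg hdc]
        rw [ih (c ++ [d]) (List.nodup_cons.1 hnd).2
          (by
            intro x hx
            simp only [List.mem_append, List.mem_singleton]
            rintro (hc | rfl)
            · exact hfr x (List.mem_cons_of_mem _ hx) hc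
            · exact (List.nodup_cons.1 hnd).1 hx)]
        have hlen : n.toNat - c.length = (n.toNat - (c ++ [d]).length) + 1 := by
          simp only [List.length_append, List.length_singleton]
          omega
        rw [hlen, List.take_succ_cons]
        simp

theorem sorted2_eq_sorted_lex {α : Type} (xs : List α) (k1 k2 : α → Int) :
    PySem.List.sorted2 xs k1 k2 false
      = PySem.List.sorted xs (fun x => toLex (k1 x, k2 x)) false := by
  rw [PySem.List.sorted_eq_foldl_insertBy]
  show xs.foldl (fun acc x => PySem.List.insertBy
      (fun a b => decide (k1 a < k1 b) || (!decide (k1 b < k1 a) && decide (k2 a < k2 b))) x acc) [] = _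
  congr 1
  funext acc x
  congr 1
  funext a b
  rcases lt_trichotomy (k1 a) (k1 b) with h | h | h
  · have h2 : ¬ k1 b < k1 a := by omega
    simp [Prod.Lex.lt_iff, h, h2]
  · have h1 : ¬ k1 a < k1 b := by omega
    have h2 : ¬ k1 b < k1 a := by omega
    simp [Prod.Lex.lt_iff, h]
  · have h1 : ¬ k1 a < k1 b := by omega
    have hL : ¬ (toLex (k1 a, k2 a) < toLex (k1 b, k2 b)) := by
      rw [Prod.Lex.lt_iff]
      simp only [ofLex_toLex]
      rintro (h' | ⟨h', _⟩) <;> omega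
    simp [h1, h, hL]

theorem headD_mem {l : List Int} (h : l ≠ []) : l.headD 0 ∈ l := by
  cases l with
  | nil => exact absurd rfl h
  | cons a t => simp

theorem main_branch (n : Int) (rnk : Int → Int) (absent : List Int)
    (hnn : absent ≠ []) (hpw : absent.Pairwise (· < ·))
    (hn0 : 0 < n) (hlen : n < (absent.length : Int)) :
    PySem.List.sorted
      (absent.foldl
        (fun (st3 : List Int × PySem.Set Int) d =>
          if n ≤ (st3.1.length : Int) then st3
          else if PySem.Set.contains st3.2 d then st3
          else (st3.1 ++ [d], PySem.Set.add st3.2 d))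
        ((PySem.List.sorted2
            (((absent.drop 1).foldl (fun (s : List (List Int) × List Int) d =>
                if rnk d = rnk ((s.2.getLast?).getD 0) + 1 then (s.1, s.2 ++ [d])
                else (s.1 ++ [s.2], [d])) ([], [absent.headD 0])).1
              ++ [((absent.drop 1).foldl (fun (s : List (List Int) × List Int) d =>
                if rnk d = rnk ((s.2.getLast?).getD 0) + 1 then (s.1, s.2 ++ [d])
                else (s.1 ++ [s.2], [d])) ([], [absent.headD 0])).2])
            (fun r => -(r.length : Int)) (fun r => r.headD 0) false).foldl
          (fun st2 run => run.foldl
            (fun (st3 : List Int × PySem.Set Int) d =>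
              if n ≤ (st3.1.length : Int) then st3
              else if PySem.Set.contains st3.2 d then st3
              else (st3.1 ++ [d], PySem.Set.add st3.2 d)) st2)
          ([], PySem.Set.empty))).1
      (fun x => x) false
    = PySem.List.sorted
        (((PySem.List.sorted2 (annotate rnk absent)
            (fun t => -t.2) (fun t => t.1) false).take n.toNat).map (fun t => t.1))
        (fun x => x) false := by
  have hdc : absent.headD 0 :: absent.drop 1 = absent := by
    cases absent with
    | nil => exact absurd rfl hnn
    | cons a t => simp
  -- A's runs-building loop produces exactly Source B's grouping
  have hruns : (((absent.drop 1).foldl (fun (s : List (List Int) × List Int) d =>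
        if rnk d = rnk ((s.2.getLast?).getD 0) + 1 then (s.1, s.2 ++ [d])
        else (s.1 ++ [s.2], [d])) ([], [absent.headD 0])).1
      ++ [((absent.drop 1).foldl (fun (s : List (List Int) × List Int) d =>
        if rnk d = rnk ((s.2.getLast?).getD 0) + 1 then (s.1, s.2 ++ [d])
        else (s.1 ++ [s.2], [d])) ([], [absent.headD 0])).2])
      = runsB rnk absent := by
    rw [foldl_runs rnk (absent.drop 1) [] [absent.headD 0]]
    rw [runsCont_eq rnk (absent.drop 1) [absent.headD 0] (by simp)]
    simp only [List.getLast?_singleton, Option.getD_some, List.nil_append]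
    conv_rhs => rw [← hdc]
    rw [runsB]
    simp
  rw [hruns]
  rw [sorted2_eq_sorted_lex (runsB rnk absent) (fun r => -(r.length : Int)) (fun r => r.headD 0)]
  set rs := PySem.List.sorted (runsB rnk absent)
      (fun r => toLex (-(r.length : Int), r.headD 0)) false with hrs
  have hflat : (runsB rnk absent).flatten = absent := flatten_runsB rnk absent
  have hpermrs : rs.Perm (runsB rnk absent) := PySem.List.sorted_perm _ _ _
  have hflatperm : rs.flatten.Perm absent := by
    have := hpermrs.flatten
    rwa [hflat] at this
  have hnd : absent.Nodup := hpw.nodup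
  have hndflat : rs.flatten.Nodup := (hflatperm.nodup_iff).2 hnd
  have hlenflat : rs.flatten.length = absent.length := hflatperm.length_eq
  have htn : n.toNat ≤ rs.flatten.length := by omega
  -- the selection loops pick exactly the first n days of the flattened sorted runs
  have hA : (absent.foldl
        (fun (st3 : List Int × PySem.Set Int) d =>
          if n ≤ (st3.1.length : Int) then st3
          else if PySem.Set.contains st3.2 d then st3
          else (st3.1 ++ [d], PySem.Set.add st3.2 d))
        (rs.foldl
          (fun st2 run => run.foldl
            (fun (st3 : List Int × PySem.Set Int) d =>
              if n ≤ (st3.1.length : Int) then st3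
              else if PySem.Set.contains st3.2 d then st3
              else (st3.1 ++ [d], PySem.Set.add st3.2 d)) st2)
          ([], PySem.Set.empty))).1
      = rs.flatten.take n.toNat := by
    have e1 : rs.foldl
        (fun st2 run => run.foldl
          (fun (st3 : List Int × PySem.Set Int) d =>
            if n ≤ (st3.1.length : Int) then st3
            else if PySem.Set.contains st3.2 d then st3
            else (st3.1 ++ [d], PySem.Set.add st3.2 d)) st2)
        (([] : List Int), (PySem.Set.empty : PySem.Set Int))
        = (rs.flatten.take n.toNat, rs.flatten.take n.toNat) := by
      rw [show ((([] : List Int), (PySem.Set.empty : PySem.Set Int)) : List Int × PySem.Set Int)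
          = (([] : List Int), ([] : PySem.Set Int)) from rfl]
      rw [← List.foldl_flatten, sel_pair n rs.flatten []]
      have e3 : rs.flatten.foldl (gsel n) [] = rs.flatten.take n.toNat := by
        have := gsel_fresh n rs.flatten [] hndflat (by simp)
        simpa using this
      rw [e3]
    rw [e1, sel_pair n absent (rs.flatten.take n.toNat)]
    rw [gsel_full n absent (rs.flatten.take n.toNat)
      (by
        rw [List.length_take]
        have : min n.toNat rs.flatten.length = n.toNat := by omega
        rw [this]
        omega)]
  rw [hA]
  -- Source B's single keyed sort equals the flattening of A's sorted runs, annotated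
  have heach : ∀ r ∈ runsB rnk absent, r ≠ [] := runsB_ne_nil rnk absent
  have hpairflat : ((runsB rnk absent).flatten).Pairwise (· < ·) := by
    rw [hflat]; exact hpw
  obtain ⟨hin, hblocks⟩ := List.pairwise_flatten.1 hpairflat
  have hBsorted : PySem.List.sorted2 (annotate rnk absent)
      (fun t : Int × Int => -t.2) (fun t : Int × Int => t.1) false
      = rs.flatMap (fun r => r.map (fun x => (x, (r.length : Int)))) := by
    rw [sorted2_eq_sorted_lex]
    apply PySem.List.sorted_eq_of_perm_of_pairwise_lt
    · rw [annotate_eq_flatMap rnk absent]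
      rw [List.flatMap_def, List.flatMap_def]
      exact (hpermrs.map _).flatten
    · rw [List.flatMap_def]
      apply List.pairwise_flatten.2
      constructor
      · intro l hl
        obtain ⟨r, hr, rfl⟩ := List.mem_map.1 hl
        rw [List.pairwise_map]
        have hrruns : r ∈ runsB rnk absent := (hpermrs.mem_iff).1 hr
        exact (hin r hrruns).imp (fun {a b} hab => by
          rw [Prod.Lex.lt_iff]
          right
          exact ⟨rfl, hab⟩)
      · rw [List.pairwise_map]
        have hQ : rs.Pairwise (fun r s : List Int =>
            (∀ x ∈ r, ∀ y ∈ s, x < y) ∨ (∀ x ∈ s, ∀ y ∈ r, x < y)) := by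
          refine (List.Perm.pairwise_iff (fun h => h.symm) hpermrs).2 ?_
          exact hblocks.imp (fun h => Or.inl h)
        have hLe : rs.Pairwise (fun r s : List Int =>
            (toLex (-(r.length : Int), r.headD 0)) ≤ toLex (-(s.length : Int), s.headD 0)) := by
          have := PySem.List.sorted_pairwise (runsB rnk absent)
            (fun r : List Int => toLex (-(r.length : Int), r.headD 0))
          rwa [← hrs] at this
        refine (hQ.and hLe).imp_of_mem ?_
        intro r s hrm hsm hand t ht u hu
        obtain ⟨hq, hle⟩ := hand
        obtain ⟨x, hx, rfl⟩ := List.mem_map.1 ht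
        obtain ⟨y, hy, rfl⟩ := List.mem_map.1 hu
        have hrne : r ≠ [] := heach r ((hpermrs.mem_iff).1 hrm)
        have hsne : s ≠ [] := heach s ((hpermrs.mem_iff).1 hsm)
        rw [Prod.Lex.le_iff] at hle
        rw [Prod.Lex.lt_iff]
        simp only [ofLex_toLex] at hle ⊢
        rcases hle with hlt | ⟨heq, hhead⟩
        · exact Or.inl hlt
        · rcases hq with hfwd | hbwd
          · exact Or.inr ⟨heq, hfwd x hx y hy⟩
          · exfalso
            have := hbwd _ (headD_mem hsne) _ (headD_mem hrne)
            omega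
  rw [hBsorted]
  congr 1
  rw [List.map_take, List.map_flatMap]
  have hcollapse : (List.flatMap (fun r : List Int =>
      List.map (fun t : Int × Int => t.1) (List.map (fun x => (x, (r.length : Int))) r)) rs)
      = List.flatMap id rs := by
    congr 1
    funext r
    have hfun : ((fun t : Int × Int => t.1) ∘ fun x : Int => (x, (r.length : Int))) = (fun x : Int => x) := by
      funext x; rfl
    rw [List.map_map, hfun]
    simp
  rw [hcollapse, List.flatMap_id]

-- ===== VERDICT (by name: the statement is the Claim_ definition above) =====
theorem best_absent_days_spec : Claim_equal_best_absent_days := by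
  unfold Claim_equal_best_absent_days
  intro attended school_days n _
  unfold Spec_best_absent_days
  simp only [best_absent_days, best_absent_days_alt]
  split_ifs with h1 h2
  · rfl
  · rfl
  · obtain ⟨hne, hn0⟩ := not_or.1 h1
    have hnd0 : (PySem.Set.diff (PySem.Set.ofList school_days) attended).Nodup :=
      List.Nodup.filter _ (PySem.Set.nodup_ofList school_days)
    have hnd : (PySem.List.sorted (PySem.Set.diff (PySem.Set.ofList school_days) attended)
        (fun x => x) false).Nodup :=
      ((PySem.List.sorted_perm _ _ _).nodup_iff).2 hnd0
    have hle := PySem.List.sorted_pairwise (PySem.Set.diff (PySem.Set.ofList school_days) attended)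
      (fun x : Int => x)
    have hpw : (PySem.List.sorted (PySem.Set.diff (PySem.Set.ofList school_days) attended)
        (fun x => x) false).Pairwise (· < ·) :=
      (hle.and hnd).imp (fun h => lt_of_le_of_ne h.1 h.2)
    exact main_branch n _ _ hne hpw (by omega) (by omega)
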